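-- pv_equiv track=rewrite | github.com/bhargav422/Interview_Preparation | strings_prep.py | check_dup_letters
-- ===== SOURCE A (Python) =====
-- def check_dup_letters(str):
--     """
--     Function in Python to check duplicate letters. It must accept a string, i.e., a sentence.
--
--     :return : True if the sentence has any word with duplicate letters, else return False.
--     """
--     check_str = str.lower().split()
--     seen = set()
--     for word in check_str:
--         if word in seen:
--             return True
--         seen.add(word)
--
--     return False
-- ===== SOURCE B (Python) =====
-- def check_dup_letters(str):
--     """Sort-then-scan re-implementation: sort the words and look for an equal adjacent pair."""
--     words = sorted(str.lower().split())
--     for a, b in zip(words, words[1:]):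
--         if a == b:
--             return True
--     return False
-- ===== Notes on version B (the rewrite author's own statement) =====
-- stated objective: alternative
-- what changed: Replaces the incremental seen-set membership loop with sort-the-words-then-scan-adjacent-pairs; a duplicate word shows up as an equal adjacent pair in the sorted list.
import Mathlib
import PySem

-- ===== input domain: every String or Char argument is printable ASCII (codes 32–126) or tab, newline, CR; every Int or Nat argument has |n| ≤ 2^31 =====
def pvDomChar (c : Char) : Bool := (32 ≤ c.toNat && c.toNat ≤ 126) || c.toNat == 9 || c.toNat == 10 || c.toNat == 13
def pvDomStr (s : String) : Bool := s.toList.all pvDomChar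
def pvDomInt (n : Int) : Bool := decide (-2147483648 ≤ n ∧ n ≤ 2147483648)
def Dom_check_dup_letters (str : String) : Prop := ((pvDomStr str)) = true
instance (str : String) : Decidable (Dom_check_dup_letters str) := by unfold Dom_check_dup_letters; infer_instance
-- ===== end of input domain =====

-- B replaces A's incremental seen-set membership loop by sorting the words and scanning adjacent pairs (alternative algorithm, same results).

-- ===== PORT A =====
-- the 'for word in check_str' loop with its early return and the growing 'seen' set
def checkDupLoopA : List String → PySem.Set String → Bool
  | [], _ => false
  | w :: ws, seen => if PySem.Set.contains seen w then true else checkDupLoopA ws (PySem.Set.add seen w)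

def check_dup_letters (str : String) : Bool :=
  checkDupLoopA (PySem.Str.split₀ (PySem.Str.lower str)) PySem.Set.empty

-- ===== PORT B =====
-- the 'for a, b in zip(words, words[1:])' loop over adjacent pairs
def adjEqLoopB : List String → Bool
  | a :: b :: t => if a == b then true else adjEqLoopB (b :: t)
  | _ => false

def check_dup_letters_alt (str : String) : Bool :=
  adjEqLoopB (PySem.List.sorted (PySem.Str.split₀ (PySem.Str.lower str)) (fun x => x) false)

-- ===== PRECONDITION & SPEC =====
def Spec_check_dup_letters (str : String) (out : Bool) : Prop := out = check_dup_letters_alt str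
instance (str : String) (out : Bool) : Decidable (Spec_check_dup_letters str out) := by unfold Spec_check_dup_letters; infer_instance

-- ===== CLAIM (what is proved, stated in full; the proofs are below) =====
def Claim_equal_check_dup_letters : Prop := ∀ (str : String), Dom_check_dup_letters str → Spec_check_dup_letters str (check_dup_letters str)

-- ===== LEMMAS AND PROOFS =====

-- A's loop returns false iff the remaining words are distinct and none was seen before
theorem checkDupLoopA_false_iff (ws : List String) (seen : PySem.Set String) :
    checkDupLoopA ws seen = false ↔ ws.Nodup ∧ ∀ w ∈ ws, w ∉ seen := by
  induction ws generalizing seen with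
  | nil => simp [checkDupLoopA]
  | cons a t ih =>
    cases hcont : PySem.Set.contains seen a with
    | true =>
      have ha : a ∈ seen := (PySem.Set.contains_iff seen a).mp hcont
      simp only [checkDupLoopA, hcont, if_true]
      constructor
      · intro hc; exact absurd hc (by simp)
      · rintro ⟨_, hns⟩; exact absurd ha (hns a (List.mem_cons_self ..))
    | false =>
      have ha : a ∉ seen := fun hm => by
        rw [(PySem.Set.contains_iff seen a).mpr hm] at hcont; exact Bool.true_eq_false.mp hcont
      simp only [checkDupLoopA, hcont, Bool.false_eq_true, if_false, ih, List.nodup_cons,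
        List.mem_cons]
      constructor
      · rintro ⟨hnd, hns⟩
        refine ⟨⟨fun hm => ?_, hnd⟩, fun w hw => ?_⟩
        · exact (hns a hm) ((PySem.Set.mem_add seen a a).mpr (Or.inr rfl))
        · rcases hw with rfl | hw
          · exact ha
          · exact fun hm => (hns w hw) ((PySem.Set.mem_add seen a w).mpr (Or.inl hm))
      · rintro ⟨⟨hna, hnd⟩, hns⟩
        refine ⟨hnd, fun w hw hm => ?_⟩
        rcases (PySem.Set.mem_add seen a w).mp hm with hm' | rfl
        · exact hns w (Or.inr hw) hm'
        · exact hna hw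

-- on a ≤-sorted list, an equal adjacent pair exists iff the list has a duplicate
theorem adjEqLoopB_false_iff (l : List String) (hp : l.Pairwise (· ≤ ·)) :
    adjEqLoopB l = false ↔ l.Nodup := by
  induction l with
  | nil => simp [adjEqLoopB]
  | cons a t ih =>
    cases t with
    | nil => simp [adjEqLoopB]
    | cons b t' =>
      obtain ⟨hab, hp'⟩ := List.pairwise_cons.mp hp
      by_cases h : a = b
      · subst h
        simp [adjEqLoopB]
      · have hlt : a < b := lt_of_le_of_ne (hab b (List.mem_cons_self ..)) h
        have hnotin : a ∉ b :: t' := by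
          intro hm
          rcases List.mem_cons.mp hm with rfl | hm'
          · exact h rfl
          · have hbx : b ≤ a := (List.pairwise_cons.mp hp').1 a hm'
            exact absurd hbx (not_le_of_gt hlt)
        simp only [adjEqLoopB, beq_iff_eq, h, if_false, ih hp', List.nodup_cons]
        constructor
        · intro hnd; exact ⟨hnotin, hnd⟩
        · rintro ⟨_, hnd⟩; exact hnd

-- ===== VERDICT (by name: the statement is the Claim_ definition above) =====
theorem check_dup_letters_spec : Claim_equal_check_dup_letters := by
  intro str _
  unfold Spec_check_dup_letters check_dup_letters check_dup_letters_alt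
  set ws := PySem.Str.split₀ (PySem.Str.lower str) with hws
  have hA : checkDupLoopA ws PySem.Set.empty = false ↔ ws.Nodup := by
    rw [checkDupLoopA_false_iff]
    simp [PySem.Set.empty]
  have hperm : (PySem.List.sorted ws (fun x => x) false).Perm ws := PySem.List.sorted_perm ..
  have hB : adjEqLoopB (PySem.List.sorted ws (fun x => x) false) = false ↔ ws.Nodup := by
    rw [adjEqLoopB_false_iff _ (by simpa using PySem.List.sorted_pairwise ws (fun x => x))]
    exact hperm.nodup_iff
  have key := hA.trans hB.symm
  cases hx : checkDupLoopA ws PySem.Set.empty <;>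
    cases hy : adjEqLoopB (PySem.List.sorted ws (fun x => x) false) <;> simp_all
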